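-- pv_equiv track=rewrite | github.com/JustZer/common_tools | data_processing/protobuf_/process_proto.py | get_dynamic_wire_format
-- ===== SOURCE A (Python) =====
-- def get_dynamic_wire_format(data, start, end):
--     wire_type = data[start] & 0x7
--     firstByte = data[start]
--     if (firstByte & 0x80) == 0:
--         field_number = (firstByte >> 3)
--         return (start + 1, wire_type, field_number)
--     else:
--         byteList = []
--         pos = 0
--         while True:
--             if start + pos >= end:
--                 return (None, None, None)
--             oneByte = data[start + pos]
--             byteList.append(oneByte & 0x7F)
--             pos = pos + 1
--             if oneByte & 0x80 == 0x0:
--                 break;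
--
--         newStart = start + pos
--
--         index = len(byteList) - 1
--         field_number = 0
--         while index >= 0:
--             field_number = (field_number << 0x7) + byteList[index]
--             index = index - 1
--
--         field_number = (field_number >> 3)
--         return (newStart, wire_type, field_number)
-- ===== SOURCE B (Python) =====
-- def get_dynamic_wire_format(data, start, end):
--     first = data[start]
--     wire_type = first & 0x7
--     if first & 0x80 == 0:
--         return (start + 1, wire_type, first >> 3)
--     field_number = 0
--     for pos in range(end - start):
--         b = data[start + pos]
--         field_number += (b & 0x7F) << (7 * pos)
--         if b & 0x80 == 0:
--             return (start + pos + 1, wire_type, field_number >> 3)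
--     return (None, None, None)
-- ===== Notes on version B (the rewrite author's own statement) =====
-- stated objective: simpler
-- what changed: The multibyte varint branch becomes a single bounded for-loop over range(end-start) that accumulates field_number += (b & 0x7F) << (7*pos) and returns as soon as the terminator byte appears, replacing A's unbounded while-loop that collects low-7-bit chunks into a list plus a second reverse (fn << 7) + chunk reconstruction loop.
import Mathlib
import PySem

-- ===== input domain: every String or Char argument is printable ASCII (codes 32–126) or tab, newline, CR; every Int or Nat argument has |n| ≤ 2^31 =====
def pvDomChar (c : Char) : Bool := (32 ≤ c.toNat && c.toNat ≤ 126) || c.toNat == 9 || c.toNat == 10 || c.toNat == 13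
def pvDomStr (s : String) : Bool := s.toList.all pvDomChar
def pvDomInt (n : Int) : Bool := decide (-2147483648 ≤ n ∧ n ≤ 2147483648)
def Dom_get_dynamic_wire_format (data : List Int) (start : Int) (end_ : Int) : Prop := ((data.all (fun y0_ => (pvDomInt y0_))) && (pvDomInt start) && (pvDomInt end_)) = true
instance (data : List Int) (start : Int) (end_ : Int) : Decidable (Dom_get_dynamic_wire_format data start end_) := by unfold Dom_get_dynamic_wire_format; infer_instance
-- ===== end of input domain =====

-- B replaces A's two-pass varint decoding (collect chunks into a list, then reconstruct
-- backwards) by one bounded for-loop over range(end-start) that accumulates the field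
-- number forward and returns immediately at the terminator; objective: simpler, same cost.

-- ===== PORT A =====
-- A's inner `while True` collector: appends (byte & 0x7F) chunks, returns (byteList, pos);
-- `none` covers A's `return (None, None, None)` when start+pos >= end (and the IndexError
-- case excluded by Pre_). fuel makes the loop total (ample: the loop runs < end_ - start
-- times); the `start + pos ≥ end_` guard is the Python loop's own exit.
def pvCollectA (data : List Int) (end_ start : Int) (fuel : Nat) (pos : Int)
    (byteList : List Int) : Option (List Int × Int) :=
  match fuel with
  | 0 => none
  | fuel + 1 =>
    if start + pos ≥ end_ then none
    else
      match PySem.List.pyGet? data (start + pos) with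
      | none => none  -- IndexError in Python; excluded by Pre_
      | some oneByte =>
        let byteList' := byteList ++ [PySem.Int.band oneByte 0x7F]
        if PySem.Int.band oneByte 0x80 = 0 then some (byteList', pos + 1)
        else pvCollectA data end_ start fuel (pos + 1) byteList'

def get_dynamic_wire_format (data : List Int) (start : Int) (end_ : Int) :
    Option Int × Option Int × Option Int :=
  match PySem.List.pyGet? data start with
  | none => (none, none, none)  -- IndexError; excluded by Pre_
  | some firstByte =>
    let wire_type := PySem.Int.band firstByte 0x7
    if PySem.Int.band firstByte 0x80 = 0 then
      (some (start + 1), some wire_type, some (firstByte >>> (3:Nat)))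
    else
      match pvCollectA data end_ start ((end_ - start).toNat + 1) 0 [] with
      | none => (none, none, none)
      | some (byteList, pos) =>
        let newStart := start + pos
        -- A's second loop: index from len-1 down to 0, fn = (fn << 7) + byteList[index]
        let field_number := byteList.reverse.foldl (fun (fn b : Int) => (fn <<< (7:Nat)) + b) 0
        (some newStart, some wire_type, some (field_number >>> (3:Nat)))

-- ===== PORT B =====
-- B's `for pos in range(end - start)` body: structural recursion over the range list;
-- returns the final triple directly at the terminator, (none,none,none) when the range is
-- exhausted. `pos.toNat` in the shift is exact: range elements here are ≥ 0.
def pvScanB (data : List Int) (start wire_type : Int) :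
    List Int → Int → Option Int × Option Int × Option Int
  | [], _ => (none, none, none)
  | pos :: rest, field_number =>
    match PySem.List.pyGet? data (start + pos) with
    | none => (none, none, none)  -- IndexError in Python; excluded by Pre_
    | some b =>
      let field_number' := field_number + (PySem.Int.band b 0x7F <<< (7 * pos).toNat)
      if PySem.Int.band b 0x80 = 0 then
        (some (start + pos + 1), some wire_type, some (field_number' >>> (3:Nat)))
      else pvScanB data start wire_type rest field_number'

def get_dynamic_wire_format_alt (data : List Int) (start : Int) (end_ : Int) :
    Option Int × Option Int × Option Int :=
  match PySem.List.pyGet? data start with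
  | none => (none, none, none)  -- IndexError; excluded by Pre_
  | some first =>
    let wire_type := PySem.Int.band first 0x7
    if PySem.Int.band first 0x80 = 0 then
      (some (start + 1), some wire_type, some (first >>> (3:Nat)))
    else pvScanB data start wire_type (PySem.List.pyRange 0 (end_ - start) 1) 0

-- ===== PRECONDITION & SPEC =====
-- Pre_ excludes exactly the inputs where A raises IndexError: start not a valid index, or
-- the first byte has its high bit set, end exceeds the buffer length, and every byte from
-- start to the end of the buffer has its high bit set (so the loop runs off the buffer).
def Pre_get_dynamic_wire_format (data : List Int) (start : Int) (end_ : Int) : Prop :=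
  PySem.Raise.InRange data.length start ∧
  ¬(PySem.Int.band (PySem.List.pyGetD data start 0) 0x80 ≠ 0 ∧ (data.length : Int) < end_ ∧
     ∀ q ∈ PySem.List.pyRange start (data.length : Int) 1,
       PySem.Int.band (PySem.List.pyGetD data q 0) 0x80 ≠ 0)
instance (data : List Int) (start : Int) (end_ : Int) :
    Decidable (Pre_get_dynamic_wire_format data start end_) := by
  unfold Pre_get_dynamic_wire_format; infer_instance

def pvWitness_get_dynamic_wire_format : List Int × Int × Int := ([0x85, 0x22], 0, 2)

def Spec_get_dynamic_wire_format (data : List Int) (start : Int) (end_ : Int)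
    (out : Option Int × Option Int × Option Int) : Prop :=
  out = get_dynamic_wire_format_alt data start end_
instance (data : List Int) (start : Int) (end_ : Int)
    (out : Option Int × Option Int × Option Int) :
    Decidable (Spec_get_dynamic_wire_format data start end_ out) := by
  unfold Spec_get_dynamic_wire_format; infer_instance

-- ===== CLAIM (what is proved, stated in full; the proofs are below) =====
def Claim_equal_get_dynamic_wire_format : Prop :=
  ∀ (data : List Int) (start : Int) (end_ : Int),
    Dom_get_dynamic_wire_format data start end_ →
    Pre_get_dynamic_wire_format data start end_ →
    Spec_get_dynamic_wire_format data start end_ (get_dynamic_wire_format data start end_)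

-- ===== LEMMAS AND PROOFS =====

-- the value A's second (reverse) loop computes from a chunk list
def pvRecon (l : List Int) : Int := l.reverse.foldl (fun (fn b : Int) => (fn <<< (7:Nat)) + b) 0

theorem pvRecon_foldl_shift (l : List Int) (a : Int) :
    l.foldl (fun (fn b : Int) => (fn <<< (7:Nat)) + b) a
      = l.foldl (fun (fn b : Int) => (fn <<< (7:Nat)) + b) 0 + a * 2 ^ (7 * l.length) := by
  induction l generalizing a with
  | nil => simp
  | cons c l ih =>
    simp only [List.foldl_cons, List.length_cons]
    rw [ih ((a <<< (7:Nat)) + c), ih (((0 : Int) <<< (7:Nat)) + c)]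
    simp only [Int.shiftLeft_eq]
    have hp : (2 : Int) ^ (7 * (l.length + 1)) = 2 ^ (7 * l.length) * 2 ^ 7 := by
      rw [← pow_add]; ring_nf
    rw [hp]; ring

theorem pvRecon_append (acc : List Int) (c : Int) :
    pvRecon (acc ++ [c]) = pvRecon acc + c <<< (7 * acc.length) := by
  unfold pvRecon
  rw [List.reverse_append, List.reverse_singleton, List.singleton_append,
      List.foldl_cons, pvRecon_foldl_shift]
  simp only [Int.shiftLeft_eq, List.length_reverse]
  ring

-- B's scan over pyRange pos (end_-start) 1, started at pvRecon acc, computes exactly what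
-- A's top level computes from pvCollectA's result (including the none cases).
theorem pvScanB_eq_collectA (data : List Int) (end_ start wt : Int) (fuel : Nat)
    (pos : Int) (acc : List Int) (hpos : pos = (acc.length : Int))
    (hfuel : (end_ - start - pos).toNat < fuel) :
    pvScanB data start wt (PySem.List.pyRange pos (end_ - start) 1) (pvRecon acc)
      = match pvCollectA data end_ start fuel pos acc with
        | none => (none, none, none)
        | some (bl, p) => (some (start + p), some wt, some (pvRecon bl >>> (3:Nat))) := by
  induction fuel generalizing pos acc with
  | zero => omega
  | succ fuel ih =>
    unfold pvCollectA
    by_cases h : start + pos ≥ end_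
    · rw [PySem.List.pyRange_one_eq_nil (by omega)]
      simp [h, pvScanB]
    · rw [PySem.List.pyRange_one_cons (by omega)]
      simp only [h, if_false, pvScanB]
      cases hget : PySem.List.pyGet? data (start + pos) with
      | none => rfl
      | some b =>
        have hshift : (7 * pos).toNat = 7 * acc.length := by omega
        by_cases hstop : PySem.Int.band b 0x80 = 0
        · simp [hstop, hshift, ← pvRecon_append]; omega
        · simp only [hstop, if_false]
          rw [hshift, ← pvRecon_append]
          exact ih (pos + 1) (acc ++ [PySem.Int.band b 0x7F]) (by simp [hpos])
            (by omega)

-- ===== VERDICT (by name: the statement is the Claim_ definition above) =====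
theorem get_dynamic_wire_format_spec : Claim_equal_get_dynamic_wire_format := by
  intro data start end_ _hdom _hpre
  unfold Spec_get_dynamic_wire_format get_dynamic_wire_format get_dynamic_wire_format_alt
  cases hget : PySem.List.pyGet? data start with
  | none => rfl
  | some firstByte =>
    simp only []
    by_cases hfb : PySem.Int.band firstByte 0x80 = 0
    · simp [hfb]
    · simp only [hfb, if_false]
      have h := pvScanB_eq_collectA data end_ start (PySem.Int.band firstByte 0x7)
        ((end_ - start).toNat + 1) 0 [] (by simp) (by omega)
      simp only [pvRecon, List.reverse_nil, List.foldl_nil] at h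
      rw [h]
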